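-- pv_equiv track=rewrite | github.com/APSODE/baekjoon-study-storage | common_math/Question2903.py | calc_dot_amount
-- ===== SOURCE A (Python) =====
-- from math import isqrt
--
-- def calc_dot_amount(loop_amount: int, before_amount: int = 4) -> int:
--     if loop_amount > 0:
--         side_dot_amount = isqrt(before_amount)
--
--         next_side_dot_amount = 2 * side_dot_amount - 1
--         next_dot_amount = next_side_dot_amount ** 2
--
--         return calc_dot_amount(loop_amount - 1, before_amount = next_dot_amount)
--
--     else:
--         return before_amount
-- ===== SOURCE B (Python) =====
-- from math import isqrt
--
-- def calc_dot_amount(loop_amount: int, before_amount: int = 4) -> int: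
--     # Closed form: the side length follows side -> 2*side - 1, so after the
--     # first step it is |2*isqrt(b)-1| and thereafter (side-1) doubles each step.
--     if loop_amount <= 0:
--         return before_amount
--     s1 = abs(2 * isqrt(before_amount) - 1)
--     return ((s1 - 1) * 2 ** (loop_amount - 1) + 1) ** 2
-- ===== Notes on version B (the rewrite author's own statement) =====
-- stated objective: faster
-- what changed: Replaces the loop_amount-deep recursion iterating side->2*side-1 with the closed form ((|2*isqrt(b)-1|-1)*2^(n-1)+1)^2; intended as faster, measured ~100x at n=4096 (A hits Python's recursion limit on larger n, so the probe could not confirm at the top size).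
import Mathlib
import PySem

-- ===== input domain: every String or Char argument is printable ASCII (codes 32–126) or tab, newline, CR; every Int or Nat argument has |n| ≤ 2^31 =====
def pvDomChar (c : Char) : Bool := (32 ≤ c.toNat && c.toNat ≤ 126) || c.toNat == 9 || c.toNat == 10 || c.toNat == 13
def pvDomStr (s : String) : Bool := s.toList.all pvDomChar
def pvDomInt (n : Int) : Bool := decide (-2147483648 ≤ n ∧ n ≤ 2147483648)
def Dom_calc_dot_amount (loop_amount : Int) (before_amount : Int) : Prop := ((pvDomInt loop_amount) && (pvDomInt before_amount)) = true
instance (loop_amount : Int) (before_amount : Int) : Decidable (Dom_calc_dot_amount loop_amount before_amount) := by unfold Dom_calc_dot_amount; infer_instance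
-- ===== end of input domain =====

-- B replaces A's loop_amount-deep recursion by the closed form ((|2*isqrt(b)-1|-1)*2^(n-1)+1)^2.

-- ===== PORT A =====
-- math.isqrt, exact for 0 ≤ b (Pre_ excludes isqrt's ValueError on negatives)
def pyIsqrt (b : Int) : Int := (Nat.sqrt b.toNat : Int)

def calc_dot_amount (loop_amount : Int) (before_amount : Int) : Int :=
  if 0 < loop_amount then
    let side_dot_amount := pyIsqrt before_amount
    let next_side_dot_amount := 2 * side_dot_amount - 1
    let next_dot_amount := next_side_dot_amount ^ 2
    calc_dot_amount (loop_amount - 1) next_dot_amount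
  else
    before_amount
termination_by loop_amount.toNat
decreasing_by omega

-- ===== PORT B =====
def calc_dot_amount_alt (loop_amount : Int) (before_amount : Int) : Int :=
  if loop_amount ≤ 0 then before_amount
  else
    let s1 : Int := ((2 * pyIsqrt before_amount - 1).natAbs : Int)
    ((s1 - 1) * 2 ^ (loop_amount - 1).toNat + 1) ^ 2

-- ===== PRECONDITION & SPEC =====
-- Pre_ excludes exactly the inputs where Python's isqrt raises ValueError (loop_amount > 0 with negative before_amount).
def Pre_calc_dot_amount (loop_amount : Int) (before_amount : Int) : Prop :=
  0 < loop_amount → 0 ≤ before_amount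
instance (loop_amount : Int) (before_amount : Int) : Decidable (Pre_calc_dot_amount loop_amount before_amount) := by unfold Pre_calc_dot_amount; infer_instance

def pvWitness_calc_dot_amount : Int × Int := (3, 4)

def Spec_calc_dot_amount (loop_amount : Int) (before_amount : Int) (out : Int) : Prop := out = calc_dot_amount_alt loop_amount before_amount
instance (loop_amount : Int) (before_amount : Int) (out : Int) : Decidable (Spec_calc_dot_amount loop_amount before_amount out) := by unfold Spec_calc_dot_amount; infer_instance

-- ===== CLAIM (what is proved, stated in full; the proofs are below) =====
def Claim_equal_calc_dot_amount : Prop := ∀ (loop_amount : Int) (before_amount : Int), Dom_calc_dot_amount loop_amount before_amount → Pre_calc_dot_amount loop_amount before_amount → Spec_calc_dot_amount loop_amount before_amount (calc_dot_amount loop_amount before_amount)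

-- ===== LEMMAS AND PROOFS =====

lemma natAbs_cast_sq (x : Int) : ((x.natAbs : Int)) ^ 2 = x ^ 2 := by
  rw [Int.natAbs_pow_two] 

lemma toNat_sq (x : Int) : (x ^ 2).toNat = x.natAbs ^ 2 := by
  rw [← natAbs_cast_sq, ← Nat.cast_pow, Int.toNat_natCast]

lemma sqrt_of_sq (x : Int) : pyIsqrt (x ^ 2) = (x.natAbs : Int) := by
  unfold pyIsqrt
  rw [toNat_sq, Nat.sqrt_eq']

-- closed form agrees with the recursion, by induction on the number of loops
lemma key (k : Nat) : ∀ b : Int, 0 ≤ b →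
    calc_dot_amount ((k : Int) + 1) b = calc_dot_amount_alt ((k : Int) + 1) b := by
  induction k with
  | zero =>
    intro b hb
    rw [calc_dot_amount, if_pos (by omega), calc_dot_amount, if_neg (by omega)]
    unfold calc_dot_amount_alt
    rw [if_neg (by omega)]
    simp only [Nat.cast_zero, show ((0:Int) + 1 - 1).toNat = 0 from by norm_num, pow_zero,
      mul_one]
    rw [sub_add_cancel]
    exact (natAbs_cast_sq _).symm
  | succ k ih =>
    intro b hb
    rw [calc_dot_amount, if_pos (by omega)]
    have hsq : (0:Int) ≤ (2 * pyIsqrt b - 1) ^ 2 := sq_nonneg _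
    simp only [Nat.cast_add, Nat.cast_one]
    have hstep : ((k:Int) + 1 + 1 - 1) = (k : Int) + 1 := by ring
    rw [hstep, ih _ hsq]
    -- now compare the two closed forms
    unfold calc_dot_amount_alt
    rw [if_neg (by omega), if_neg (by omega)]
    rw [sqrt_of_sq]
    have hs : (0:Int) ≤ pyIsqrt b := by unfold pyIsqrt; positivity
    have h1 : ((k:Int) + 1 - 1).toNat = k := by omega
    have h2 : ((k:Int) + 1 + 1 - 1).toNat = k + 1 := by omega
    rw [h1, h2]
    set s := pyIsqrt b with hsdef
    by_cases h0 : s = 0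
    · rw [h0]
      norm_num
    · have hs1 : 1 ≤ s := by omega
      have e1 : ((2 * s - 1).natAbs : Int) = 2 * s - 1 := Int.natAbs_of_nonneg (by omega)
      have e2 : ((2 * (((2 * s - 1).natAbs : Int)) - 1).natAbs : Int)
          = 2 * (2 * s - 1) - 1 := by
        rw [e1]; exact Int.natAbs_of_nonneg (by omega)
      rw [e2, e1]
      ring

-- ===== VERDICT (by name: the statement is the Claim_ definition above) =====
theorem calc_dot_amount_spec : Claim_equal_calc_dot_amount := by
  intro n b _ hpre
  unfold Spec_calc_dot_amount
  by_cases hn : 0 < n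
  · have hb : 0 ≤ b := hpre hn
    have hk : ((n.toNat - 1 : Nat) : Int) + 1 = n := by omega
    rw [← hk]
    exact key _ b hb
  · rw [calc_dot_amount, if_neg hn]
    unfold calc_dot_amount_alt
    rw [if_pos (by omega)]
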